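-- pv_equiv track=rewrite | github.com/abigailhaddad/LLMResponseMetrics | code/overlap_tokens_prompts.py | find_words_found_in_both_and_used_tokens
-- ===== SOURCE A (Python) =====
-- def can_be_composed(word, tokens, used_tokens):
--     if word == "":
--         return True, used_tokens
--
--     for i in range(1, len(word) + 1):
--         if word[:i] in tokens:
--             success, tokens_used = can_be_composed(
--                 word[i:], tokens, used_tokens + [word[:i]]
--             )
--             if success:
--                 return True, tokens_used
--
--     return False, used_tokens
--
-- def find_words_found_in_both_and_used_tokens(words, tokens):
--     """
--     Function to find words that are either in tokens or can be composed of tokens,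
--     along with the tokens used in their composition.
--     """
--     words_found_in_both = set()
--     tokens_used = set()
--
--     for word in words:
--         if word in tokens:
--             words_found_in_both.add(word)
--             tokens_used.add(word)
--
--         success, used_tokens_for_word = can_be_composed(word, tokens, [])
--         if success:
--             words_found_in_both.add(word)
--             tokens_used.update(used_tokens_for_word)
--
--     return words_found_in_both, tokens_used
-- ===== SOURCE B (Python) =====
-- def _decompose(word, token_set):
--     # word-break DP over suffixes: best[i] = decomposition of word[i:] using the
--     # shortest valid prefix at each position, or None if not composable
--     n = len(word)
--     best = [None] * (n + 1)
--     best[n] = []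
--     for i in range(n - 1, -1, -1):
--         for j in range(i + 1, n + 1):
--             if best[j] is not None and word[i:j] in token_set:
--                 best[i] = [word[i:j]] + best[j]
--                 break
--     return best[0]
--
-- def find_words_found_in_both_and_used_tokens(words, tokens):
--     token_set = set(tokens)
--     words_found_in_both = set()
--     tokens_used = set()
--     for word in words:
--         if word in token_set:
--             words_found_in_both.add(word)
--             tokens_used.add(word)
--         parts = _decompose(word, token_set)
--         if parts is not None:
--             words_found_in_both.add(word)
--             tokens_used.update(parts)
--     return words_found_in_both, tokens_used
-- ===== Notes on version B (the rewrite author's own statement) =====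
-- stated objective: alternative
-- what changed: Replaces A's backtracking recursion over prefix splits with a bottom-up word-break DP table over suffixes that reconstructs the same shortest-prefix-first decomposition; avoids A's exponential worst case but is not measurably faster on typical inputs.
import Mathlib
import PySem

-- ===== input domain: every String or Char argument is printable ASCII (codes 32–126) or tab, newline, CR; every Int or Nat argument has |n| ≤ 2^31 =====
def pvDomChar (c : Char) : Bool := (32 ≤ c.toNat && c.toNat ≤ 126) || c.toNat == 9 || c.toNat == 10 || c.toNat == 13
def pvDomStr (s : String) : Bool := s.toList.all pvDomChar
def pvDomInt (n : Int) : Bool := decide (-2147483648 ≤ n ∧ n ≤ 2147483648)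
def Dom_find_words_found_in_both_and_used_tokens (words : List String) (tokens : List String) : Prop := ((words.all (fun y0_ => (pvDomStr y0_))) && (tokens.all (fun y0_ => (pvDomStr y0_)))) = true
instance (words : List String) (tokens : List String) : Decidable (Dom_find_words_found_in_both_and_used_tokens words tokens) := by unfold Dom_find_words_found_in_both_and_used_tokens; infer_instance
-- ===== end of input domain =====

-- B replaces A's backtracking recursion over prefix splits with a bottom-up word-break
-- DP over suffixes reconstructing the same shortest-prefix-first decomposition (objective: alternative).


-- ===== PORT A =====
-- can_be_composed: the prefix-length loop `for i in range(1, len(word)+1)` is folded into the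
-- recursion as the parameter `i` (prefix length = i+1, so prefixes are nonempty and the
-- recursion terminates); `word[:k]`/`word[k:]` for 0 ≤ k ≤ len are List.take/List.drop, exact here.
def canBeComposed (word : List Char) (tokens : List String) (used : List String) (i : Nat) : Bool × List String :=
  if word = [] then (true, used)
  else if word.length < i + 1 then (false, used)
  else
    let pre := String.mk (word.take (i + 1))
    if pre ∈ tokens then
      let r := canBeComposed (word.drop (i + 1)) tokens (used ++ [pre]) 0
      if r.1 then r else canBeComposed word tokens used (i + 1)
    else canBeComposed word tokens used (i + 1)
termination_by (word.length, word.length - i)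
decreasing_by
  · left; simp [List.length_drop]; omega
  · right; omega
  · right; omega

def find_words_found_in_both_and_used_tokens (words : List String) (tokens : List String) : List String × List String :=
  words.foldl
    (fun st word =>
      let st1 := if word ∈ tokens then (PySem.Set.add st.1 word, PySem.Set.add st.2 word) else st
      let r := canBeComposed word.toList tokens [] 0
      if r.1 then (PySem.Set.add st1.1 word, PySem.Set.update st1.2 r.2) else st1)
    (PySem.Set.empty, PySem.Set.empty)

-- ===== PORT B =====
-- _decompose's inner loop `for j in range(i+1, n+1)`: scan the already-computed suffix table
-- (entry k of `tail` is best[i+k+1], i.e. the decomposition of word.drop (k+1) relative to `word`).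
def dpInner (word : List Char) (tokens : List String) (tail : List (Option (List String))) (k : Nat) : Option (List String) :=
  match tail with
  | [] => none
  | o :: rest =>
    match o with
    | some parts =>
      let pre := String.mk (word.take (k + 1))
      if pre ∈ tokens then some (pre :: parts) else dpInner word tokens rest (k + 1)
    | none => dpInner word tokens rest (k + 1)

-- `best` built back to front: one cons per outer-loop iteration i = n-1 .. 0.
def suffixTable (word : List Char) (tokens : List String) : List (Option (List String)) :=
  match word with
  | [] => [some []]
  | c :: rest =>
    let tail := suffixTable rest tokens
    dpInner (c :: rest) tokens tail 0 :: tail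

def decompose (word : List Char) (tokens : List String) : Option (List String) :=
  (suffixTable word tokens).headD none

def find_words_found_in_both_and_used_tokens_alt (words : List String) (tokens : List String) : List String × List String :=
  let tokenSet := PySem.Set.ofList tokens
  words.foldl
    (fun st word =>
      let st1 := if PySem.Set.contains tokenSet word then (PySem.Set.add st.1 word, PySem.Set.add st.2 word) else st
      match decompose word.toList tokens with
      | some parts => (PySem.Set.add st1.1 word, PySem.Set.update st1.2 parts)
      | none => st1)
    (PySem.Set.empty, PySem.Set.empty)

-- ===== PRECONDITION & SPEC =====
def Spec_find_words_found_in_both_and_used_tokens (words : List String) (tokens : List String) (out : List String × List String) : Prop := out = find_words_found_in_both_and_used_tokens_alt words tokens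
instance (words : List String) (tokens : List String) (out : List String × List String) : Decidable (Spec_find_words_found_in_both_and_used_tokens words tokens out) := by unfold Spec_find_words_found_in_both_and_used_tokens; infer_instance

-- ===== CLAIM (what is proved, stated in full; the proofs are below) =====
def Claim_equal_find_words_found_in_both_and_used_tokens : Prop := ∀ (words : List String) (tokens : List String), Dom_find_words_found_in_both_and_used_tokens words tokens → Spec_find_words_found_in_both_and_used_tokens words tokens (find_words_found_in_both_and_used_tokens words tokens)

-- ===== LEMMAS AND PROOFS =====

-- entry k of `suffixTable word` is the decomposition of `word.drop k`
theorem suffixTable_get? (word : List Char) (tokens : List String) (k : Nat) (hk : k ≤ word.length) :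
    (suffixTable word tokens)[k]? = some (decompose (word.drop k) tokens) := by
  induction word generalizing k with
  | nil => simp at hk; subst hk; simp [suffixTable, decompose]
  | cons c rest ih =>
    cases k with
    | zero => simp [suffixTable, decompose]
    | succ k =>
      simp only [suffixTable, List.getElem?_cons_succ, List.drop_succ_cons]
      exact ih k (by simpa using hk)

theorem suffixTable_length (word : List Char) (tokens : List String) :
    (suffixTable word tokens).length = word.length + 1 := by
  induction word with
  | nil => simp [suffixTable]
  | cons c rest ih => simp [suffixTable, ih]

-- the i = 0 scan form is exactly the DP decomposition
theorem scanForm_eq_decompose (w : List Char) (tokens : List String) (u : List String) :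
    (if w = [] then ((true : Bool), u)
     else match dpInner w tokens ((suffixTable w.tail tokens).drop 0) 0 with
          | some ps => (true, u ++ ps)
          | none => (false, u)) =
    (match decompose w tokens with
     | some ps => ((true : Bool), u ++ ps)
     | none => (false, u)) := by
  cases w with
  | nil => simp [decompose, suffixTable]
  | cons c rest => simp [decompose, suffixTable]

-- scanning prefix lengths i+1, i+2, … of a nonempty word = dpInner over the dropped suffix table
theorem canBeComposed_scan (word : List Char) (tokens : List String) (used : List String) (i : Nat) :
    canBeComposed word tokens used i =
      (if word = [] then (true, used)
       else match dpInner word tokens ((suffixTable word.tail tokens).drop i) i with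
            | some ps => (true, used ++ ps)
            | none => (false, used)) := by
  induction word, used, i using canBeComposed.induct tokens with
  | case1 used i =>
    rw [canBeComposed]; simp
  | case2 word used i hnil hlen =>
    rw [canBeComposed]
    have hdrop : (suffixTable word.tail tokens).drop i = [] := by
      apply List.drop_eq_nil_of_le
      rw [suffixTable_length]
      cases word with
      | nil => exact absurd rfl hnil
      | cons c rest => simp at hlen ⊢; omega
    simp [hnil, hlen, hdrop, dpInner]
  | case3 word used i hnil hlen pre hpre r hr ih =>
    have hi : i < (suffixTable word.tail tokens).length := by
      rw [suffixTable_length]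
      cases word with
      | nil => exact absurd rfl hnil
      | cons c rest => simp at hlen ⊢; omega
    have hidx : (suffixTable word.tail tokens)[i] = decompose (word.drop (i + 1)) tokens := by
      have h := suffixTable_get? word.tail tokens i (by rw [suffixTable_length] at hi; omega)
      rw [List.getElem?_eq_getElem hi] at h
      cases word with
      | nil => exact absurd rfl hnil
      | cons c rest => simpa using h
    have key := ih.trans (scanForm_eq_decompose (word.drop (i + 1)) tokens (used ++ [pre]))
    have hr2 : (canBeComposed (word.drop (i + 1)) tokens (used ++ [pre]) 0).1 = true := hr
    rw [key] at hr2
    rw [canBeComposed]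
    simp only [if_neg hnil, if_neg hlen]
    rw [key, List.drop_eq_getElem_cons hi, hidx]
    cases hdec : decompose (word.drop (i + 1)) tokens with
    | none => rw [hdec] at hr2; simp at hr2
    | some ps =>
      have hpre' : String.mk (List.take (i + 1) word) ∈ tokens := hpre
      simp [dpInner, hpre']
      rfl
  | case4 word used i hnil hlen pre hpre r hr ih1 ih2 =>
    have hi : i < (suffixTable word.tail tokens).length := by
      rw [suffixTable_length]
      cases word with
      | nil => exact absurd rfl hnil
      | cons c rest => simp at hlen ⊢; omega
    have hidx : (suffixTable word.tail tokens)[i] = decompose (word.drop (i + 1)) tokens := by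
      have h := suffixTable_get? word.tail tokens i (by rw [suffixTable_length] at hi; omega)
      rw [List.getElem?_eq_getElem hi] at h
      cases word with
      | nil => exact absurd rfl hnil
      | cons c rest => simpa using h
    have key := ih1.trans (scanForm_eq_decompose (word.drop (i + 1)) tokens (used ++ [pre]))
    have hr2 : ¬(canBeComposed (word.drop (i + 1)) tokens (used ++ [pre]) 0).1 = true := hr
    rw [key] at hr2
    rw [canBeComposed]
    simp only [if_neg hnil, if_neg hlen]
    rw [key, List.drop_eq_getElem_cons hi, hidx]
    cases hdec : decompose (word.drop (i + 1)) tokens with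
    | some ps => rw [hdec] at hr2; simp at hr2
    | none =>
      have hpre' : String.mk (List.take (i + 1) word) ∈ tokens := hpre
      rw [ih2]
      simp [dpInner, hpre', hnil]
  | case5 word used i hnil hlen pre hpre ih =>
    have hi : i < (suffixTable word.tail tokens).length := by
      rw [suffixTable_length]
      cases word with
      | nil => exact absurd rfl hnil
      | cons c rest => simp at hlen ⊢; omega
    have hidx : (suffixTable word.tail tokens)[i] = decompose (word.drop (i + 1)) tokens := by
      have h := suffixTable_get? word.tail tokens i (by rw [suffixTable_length] at hi; omega)
      rw [List.getElem?_eq_getElem hi] at h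
      cases word with
      | nil => exact absurd rfl hnil
      | cons c rest => simpa using h
    rw [canBeComposed]
    simp only [if_neg hnil, if_neg hlen]
    rw [List.drop_eq_getElem_cons hi, hidx]
    cases hdec : decompose (word.drop (i + 1)) tokens with
    | some ps =>
      have hpre' : String.mk (List.take (i + 1) word) ∉ tokens := hpre
      rw [ih]
      simp [dpInner, hpre', hnil]
    | none =>
      have hpre' : String.mk (List.take (i + 1) word) ∉ tokens := hpre
      rw [ih]
      simp [dpInner, hpre', hnil]

theorem canBeComposed_eq (word : List Char) (tokens : List String) (used : List String) :
    canBeComposed word tokens used 0 =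
      (match decompose word tokens with
       | some ps => ((true : Bool), used ++ ps)
       | none => (false, used)) :=
  (canBeComposed_scan word tokens used 0).trans (scanForm_eq_decompose word tokens used)

-- the two per-word fold steps agree
theorem step_eq (tokens : List String) :
    (fun (st : List String × List String) word =>
      let st1 := if word ∈ tokens then (PySem.Set.add st.1 word, PySem.Set.add st.2 word) else st
      let r := canBeComposed word.toList tokens [] 0
      if r.1 then (PySem.Set.add st1.1 word, PySem.Set.update st1.2 r.2) else st1) =
    (fun (st : List String × List String) word =>
      let st1 := if PySem.Set.contains (PySem.Set.ofList tokens) word then (PySem.Set.add st.1 word, PySem.Set.add st.2 word) else st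
      match decompose word.toList tokens with
      | some parts => (PySem.Set.add st1.1 word, PySem.Set.update st1.2 parts)
      | none => st1) := by
  funext st word
  rw [canBeComposed_eq]
  cases hdec : decompose word.toList tokens with
  | some ps => simp
  | none => simp

-- ===== VERDICT (by name: the statement is the Claim_ definition above) =====
theorem find_words_found_in_both_and_used_tokens_spec : Claim_equal_find_words_found_in_both_and_used_tokens := by
  intro words tokens _
  unfold Spec_find_words_found_in_both_and_used_tokens
  unfold find_words_found_in_both_and_used_tokens find_words_found_in_both_and_used_tokens_alt
  rw [step_eq tokens]
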